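-- pv_equiv track=rewrite | github.com/arthexis/arthexis | apps/summary/tasks.py | _prioritize
-- ===== SOURCE A (Python) =====
-- def _prioritize(lines: list[str]) -> list[str]:
--     priority: list[str] = []
--     normal: list[str] = []
--     for line in lines:
--         bucket = priority if _is_priority(line) else normal
--         bucket.append(line)
--     ordered = priority + normal
--     return ordered
--
-- def _is_priority(line: str) -> bool:
--     normalized = line.lower()
--     return any(token in normalized for token in ("err", "fail", "warn", "crit"))
-- ===== SOURCE B (Python) =====
-- def _is_priority(line: str) -> bool:
--     normalized = line.lower()
--     return any(token in normalized for token in ("err", "fail", "warn", "crit"))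
--
--
-- def _prioritize(lines: list[str]) -> list[str]:
--     return sorted(lines, key=lambda line: 0 if _is_priority(line) else 1)
-- ===== Notes on version B (the rewrite author's own statement) =====
-- stated objective: idiomatic
-- what changed: Replaces the two-bucket append loop with a single stable sort keyed 0/1 on priority; stability makes priority lines precede normal ones, each group in original order.
import Mathlib
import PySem

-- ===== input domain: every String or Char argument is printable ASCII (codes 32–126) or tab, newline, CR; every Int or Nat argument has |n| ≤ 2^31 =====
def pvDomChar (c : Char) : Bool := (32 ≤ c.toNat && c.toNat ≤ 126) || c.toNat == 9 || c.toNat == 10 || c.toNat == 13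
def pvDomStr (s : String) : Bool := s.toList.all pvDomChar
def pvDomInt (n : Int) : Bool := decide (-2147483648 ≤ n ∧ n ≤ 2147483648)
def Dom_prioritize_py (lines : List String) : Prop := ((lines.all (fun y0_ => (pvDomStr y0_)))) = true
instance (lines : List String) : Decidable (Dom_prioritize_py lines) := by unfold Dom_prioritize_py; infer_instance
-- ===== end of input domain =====

-- B replaces A's two-bucket append loop by one stable sort on a 0/1 priority key (idiomatic; same result).

-- shared helper: _is_priority (identical in A and B)
def isPriority (line : String) : Bool :=
  let normalized := PySem.Str.lower line
  ["err", "fail", "warn", "crit"].any (fun token => PySem.Str.isIn token normalized)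

-- ===== PORT A =====
def prioritize_py (lines : List String) : List String :=
  let st := lines.foldl
    (fun (acc : List String × List String) line =>
      if isPriority line then (acc.1 ++ [line], acc.2) else (acc.1, acc.2 ++ [line]))
    ([], [])
  st.1 ++ st.2

-- ===== PORT B =====
def prioritize_py_alt (lines : List String) : List String :=
  PySem.List.sorted lines (fun line => if isPriority line then (0 : Int) else 1) false

-- ===== PRECONDITION & SPEC =====
def Spec_prioritize_py (lines : List String) (out : List String) : Prop := out = prioritize_py_alt lines
instance (lines : List String) (out : List String) : Decidable (Spec_prioritize_py lines out) := by unfold Spec_prioritize_py; infer_instance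

-- ===== CLAIM (what is proved, stated in full; the proofs are below) =====
def Claim_equal_prioritize_py : Prop := ∀ (lines : List String), Dom_prioritize_py lines → Spec_prioritize_py lines (prioritize_py lines)

-- ===== LEMMAS AND PROOFS =====

def pvKey (line : String) : Int := if isPriority line then 0 else 1

def pvBefore (a b : String) : Bool := decide (pvKey a < pvKey b)

theorem pvBefore_false_of_norm (x y : String) (hx : isPriority x = false) :
    pvBefore x y = false := by
  simp [pvBefore, pvKey, hx]
  split <;> omega

-- inserting a priority line lands exactly between the priority block and the normal block
theorem insertBy_pri (x : String) (hx : isPriority x = true) (P N : List String)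
    (hP : ∀ a ∈ P, isPriority a = true) (hN : ∀ a ∈ N, isPriority a = false) :
    PySem.List.insertBy pvBefore x (P ++ N) = P ++ x :: N := by
  induction P with
  | nil =>
    cases N with
    | nil => simp [PySem.List.insertBy]
    | cons n N' =>
      have hn : isPriority n = false := hN n (by simp)
      simp [PySem.List.insertBy, pvBefore, pvKey, hx, hn]
  | cons q P' ih =>
    have hq : isPriority q = true := hP q (by simp)
    have : pvBefore x q = false := by simp [pvBefore, pvKey, hx, hq]
    simp [PySem.List.insertBy, this]
    exact ih (fun a ha => hP a (by simp [ha]))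

theorem insertBy_norm (x : String) (hx : isPriority x = false) (L : List String) :
    PySem.List.insertBy pvBefore x L = L ++ [x] :=
  PySem.List.insertBy_of_forall_not_before pvBefore x L
    (fun y _ => pvBefore_false_of_norm x y hx)

-- the insertion-sort fold over a (priority ++ normal) accumulator stays partitioned
theorem foldl_insertBy_partition (xs : List String) :
    ∀ (P N : List String), (∀ a ∈ P, isPriority a = true) → (∀ a ∈ N, isPriority a = false) →
    xs.foldl (fun acc x => PySem.List.insertBy pvBefore x acc) (P ++ N)
      = (P ++ xs.filter isPriority) ++ (N ++ xs.filter (fun x => !isPriority x)) := by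
  induction xs with
  | nil => intro P N _ _; simp
  | cons x xs ih =>
    intro P N hP hN
    by_cases hx : isPriority x = true
    · have h1 : PySem.List.insertBy pvBefore x (P ++ N) = (P ++ [x]) ++ N := by
        rw [insertBy_pri x hx P N hP hN]; simp
      have h2 := ih (P ++ [x]) N
        (by intro a ha; rcases List.mem_append.mp ha with h | h
            · exact hP a h
            · simp at h; subst h; exact hx) hN
      simp only [List.foldl_cons, h1, h2, List.filter_cons, hx]
      simp
    · have hx' : isPriority x = false := by simpa using hx
      have h1 : PySem.List.insertBy pvBefore x (P ++ N) = P ++ (N ++ [x]) := by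
        rw [← List.append_assoc]; exact insertBy_norm x hx' (P ++ N)
      have h2 := ih P (N ++ [x]) hP
        (by intro a ha; rcases List.mem_append.mp ha with h | h
            · exact hN a h
            · simp at h; subst h; exact hx')
      simp only [List.foldl_cons, h1, h2, List.filter_cons, hx']
      simp

-- A's two-bucket fold computes the two filters
theorem foldl_buckets (xs : List String) :
    ∀ (P N : List String),
    xs.foldl (fun (acc : List String × List String) line =>
        if isPriority line then (acc.1 ++ [line], acc.2) else (acc.1, acc.2 ++ [line])) (P, N)
      = (P ++ xs.filter isPriority, N ++ xs.filter (fun x => !isPriority x)) := by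
  induction xs with
  | nil => intro P N; simp
  | cons x xs ih =>
    intro P N
    by_cases hx : isPriority x = true
    · simp only [List.foldl_cons, if_true, ih, List.filter_cons, hx]
      simp
    · have hx' : isPriority x = false := by simpa using hx
      simp only [List.foldl_cons, if_false, Bool.false_eq_true, ih, List.filter_cons, hx']
      simp

theorem alt_eq_filters (lines : List String) :
    prioritize_py_alt lines = lines.filter isPriority ++ lines.filter (fun x => !isPriority x) := by
  have h : prioritize_py_alt lines
      = lines.foldl (fun acc x => PySem.List.insertBy pvBefore x acc) ([] ++ []) := rfl
  rw [h, foldl_insertBy_partition lines [] [] (by simp) (by simp)]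
  simp

-- ===== VERDICT (by name: the statement is the Claim_ definition above) =====
theorem prioritize_py_spec : Claim_equal_prioritize_py := by
  intro lines _
  show prioritize_py lines = prioritize_py_alt lines
  rw [alt_eq_filters]
  simp only [prioritize_py, foldl_buckets lines [] []]
  simp
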